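-- pv_equiv track=rewrite | github.com/anatshafir1/CRISPys | Amplicon_construction/FindSNPTargets_v2.py | all_perms
-- ===== SOURCE A (Python) =====
-- from typing import List, Dict, Tuple
--
-- def all_perms(initial_seq: str, list_of_seqs: List[str], list_of_differences: List[Tuple[int, List[str]]]) -> List[str]:
--     """Given an initial sequence and a list of possible polymorphisms and their indices in that sequence, this function
--     creates a list of all the possible permutations of the initial sequence.
--     list_of_seqs is initialized on the first call of the function. each recursive call adds to list_of_seqs the
--     permutations produced with the next index from list_of_differences, and advances the next call to start from the
--     next index in list_of_differences. the recursion stops when len(list_of_differences) = 0.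
--     e.g. all_perms("ACTG", list(), [(0, [T,G]), (3, [A,T])]) will return ['TCTA', 'TCTT', 'GCTA', 'GCTT']
--
--     :param initial_seq: a sequence to create permutations for
--     :param list_of_seqs: list of permutations. Initially None. The function creates it during the recursion.
--     :param list_of_differences: list of tuples of polymorphisms and their locations: (index, set of nucleotides)
--     :return: list of permutations of the initial sequence
--     """
--     if len(list_of_differences) == 0:  # the stopping condition
--         if list_of_seqs:
--             return list_of_seqs
--         elif initial_seq:
--             return [initial_seq[:20]]
--         else:
--             return []
--     else:
--         new_list_of_seqs = []
--         if not list_of_seqs:  # initialising the list of sequences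
--             list_of_seqs = [initial_seq[:list_of_differences[0][0]]]
--         for seq in list_of_seqs:
--             for letter in list_of_differences[0][1]:
--                 if len(list_of_differences) > 1:
--                     new_list_of_seqs.append(seq + letter + initial_seq[len(seq) + 1:list_of_differences[1][0]])
--                     # the place of the next versatile letter place
--                 else:
--                     new_list_of_seqs.append(seq + letter + initial_seq[len(seq) + 1:20])
--         del list_of_seqs
--         return all_perms(initial_seq, new_list_of_seqs, list_of_differences[1:])
-- ===== SOURCE B (Python) =====
-- def all_perms(initial_seq, list_of_seqs, list_of_differences):
--     bounds = [d[0] for d in list_of_differences[1:]] + [20]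
--     seqs = list_of_seqs
--     for (idx, options), bound in zip(list_of_differences, bounds):
--         if not seqs:
--             seqs = [initial_seq[:idx]]
--         seqs = [s + letter + initial_seq[len(s) + 1:bound]
--                 for s in seqs for letter in options]
--     if seqs:
--         return seqs
--     if initial_seq:
--         return [initial_seq[:20]]
--     return []
-- ===== Notes on version B (the rewrite author's own statement) =====
-- stated objective: simpler
-- what changed: Replaces A's recursion carrying an accumulator through recursive calls by a single iterative pass over (difference, next-bound) pairs precomputed with zip, building each generation with one flat comprehension instead of nested append loops.
import Mathlib
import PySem

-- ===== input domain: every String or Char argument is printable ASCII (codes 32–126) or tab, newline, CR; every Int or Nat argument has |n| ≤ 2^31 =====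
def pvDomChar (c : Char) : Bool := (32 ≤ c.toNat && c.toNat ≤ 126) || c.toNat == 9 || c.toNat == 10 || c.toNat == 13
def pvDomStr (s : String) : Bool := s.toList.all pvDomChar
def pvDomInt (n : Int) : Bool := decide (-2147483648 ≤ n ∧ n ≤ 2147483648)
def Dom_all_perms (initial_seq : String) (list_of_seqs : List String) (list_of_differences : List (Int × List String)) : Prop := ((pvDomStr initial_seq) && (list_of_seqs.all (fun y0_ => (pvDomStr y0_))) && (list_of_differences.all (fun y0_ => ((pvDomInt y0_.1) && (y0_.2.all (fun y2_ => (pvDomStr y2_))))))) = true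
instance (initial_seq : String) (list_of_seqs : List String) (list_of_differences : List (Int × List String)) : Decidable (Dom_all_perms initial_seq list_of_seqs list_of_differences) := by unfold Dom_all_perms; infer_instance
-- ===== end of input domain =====

-- B replaces A's recursion-with-accumulator by a single iterative pass over
-- (difference, next-bound) pairs built with zip, using a flat comprehension per step
-- (objective: simpler, same cost; return values identical on all inputs).

-- ===== PORT A =====
-- Strings are handled on the List Char side (PySem convention); wrappers convert at the boundary.
def aPerms (ini : List Char) (seqs : List (List Char)) (diffs : List (Int × List (List Char))) : List (List Char) :=
  match diffs with
  | [] =>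
      if seqs ≠ [] then seqs
      else if ini ≠ [] then [PySem.List.slice ini none (some 20)]
      else []
  | d0 :: rest =>
      -- if not list_of_seqs: list_of_seqs = [initial_seq[:list_of_differences[0][0]]]
      let seqs' := if seqs = [] then [PySem.List.slice ini none (some d0.1)] else seqs
      -- the two nested for-loops appending to new_list_of_seqs
      let newSeqs := seqs'.foldl (fun acc seq =>
        d0.2.foldl (fun acc letter =>
          if rest.length > 0 then
            acc ++ [seq ++ letter ++ PySem.List.slice ini (some ((seq.length : Int) + 1)) (some (match rest with | [] => 20 | d1 :: _ => d1.1))]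
          else
            acc ++ [seq ++ letter ++ PySem.List.slice ini (some ((seq.length : Int) + 1)) (some 20)]) acc) []
      aPerms ini newSeqs rest

def all_perms (initial_seq : String) (list_of_seqs : List String) (list_of_differences : List (Int × List String)) : List String :=
  (aPerms initial_seq.toList (list_of_seqs.map String.toList)
    (list_of_differences.map (fun d => (d.1, d.2.map String.toList)))).map String.ofList

-- ===== PORT B =====
-- one step of B's loop: optional re-init, then the flat comprehension
def bStep (ini : List Char) (seqs : List (List Char)) (p : (Int × List (List Char)) × Int) : List (List Char) :=
  let seqs' := if seqs = [] then [PySem.List.slice ini none (some p.1.1)] else seqs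
  seqs'.flatMap (fun s => p.1.2.map (fun letter =>
    s ++ letter ++ PySem.List.slice ini (some ((s.length : Int) + 1)) (some p.2)))

def bPerms (ini : List Char) (seqs : List (List Char)) (diffs : List (Int × List (List Char))) : List (List Char) :=
  -- bounds = [d[0] for d in diffs[1:]] + [20]
  let bounds := (diffs.drop 1).map (·.1) ++ [20]
  let res := (diffs.zip bounds).foldl (bStep ini) seqs
  if res ≠ [] then res
  else if ini ≠ [] then [PySem.List.slice ini none (some 20)]
  else []

def all_perms_alt (initial_seq : String) (list_of_seqs : List String) (list_of_differences : List (Int × List String)) : List String :=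
  (bPerms initial_seq.toList (list_of_seqs.map String.toList)
    (list_of_differences.map (fun d => (d.1, d.2.map String.toList)))).map String.ofList

-- ===== PRECONDITION & SPEC =====
def Spec_all_perms (initial_seq : String) (list_of_seqs : List String) (list_of_differences : List (Int × List String)) (out : List String) : Prop := out = all_perms_alt initial_seq list_of_seqs list_of_differences
instance (initial_seq : String) (list_of_seqs : List String) (list_of_differences : List (Int × List String)) (out : List String) : Decidable (Spec_all_perms initial_seq list_of_seqs list_of_differences out) := by unfold Spec_all_perms; infer_instance

-- ===== CLAIM (what is proved, stated in full; the proofs are below) =====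
def Claim_equal_all_perms : Prop := ∀ (initial_seq : String) (list_of_seqs : List String) (list_of_differences : List (Int × List String)), Dom_all_perms initial_seq list_of_seqs list_of_differences → Spec_all_perms initial_seq list_of_seqs list_of_differences (all_perms initial_seq list_of_seqs list_of_differences)

-- ===== LEMMAS AND PROOFS =====

-- A's nested append-loops build exactly B's flat comprehension
theorem foldl_nested_append (opts : List (List Char)) (g : List Char → List Char → List Char)
    (seqs : List (List Char)) (init : List (List Char)) :
    seqs.foldl (fun acc s => opts.foldl (fun acc l => acc ++ [g s l]) acc) init
      = init ++ seqs.flatMap (fun s => opts.map (g s)) := by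
  induction seqs generalizing init with
  | nil => simp
  | cons s t ih =>
      rw [List.foldl_cons, PySem.List.foldl_append_singleton_eq_map, ih]
      simp

-- one step of A equals one step of B
theorem aStep_eq_bStep (ini : List Char) (seqs : List (List Char)) (d0 : Int × List (List Char))
    (rest : List (Int × List (List Char))) :
    ((if seqs = [] then [PySem.List.slice ini none (some d0.1)] else seqs).foldl (fun acc seq =>
        d0.2.foldl (fun acc letter =>
          if rest.length > 0 then
            acc ++ [seq ++ letter ++ PySem.List.slice ini (some ((seq.length : Int) + 1)) (some (match rest with | [] => 20 | d1 :: _ => d1.1))]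
          else
            acc ++ [seq ++ letter ++ PySem.List.slice ini (some ((seq.length : Int) + 1)) (some 20)]) acc) [])
      = bStep ini seqs (d0, match rest with | [] => 20 | d1 :: _ => d1.1) := by
  cases rest with
  | nil =>
      simp only [bStep, List.length_nil, gt_iff_lt, Nat.lt_irrefl, if_false]
      rw [foldl_nested_append]
      simp
  | cons d1 r =>
      simp only [bStep, List.length_cons, gt_iff_lt, Nat.succ_pos, if_true]
      rw [foldl_nested_append]
      simp

-- the (difference, bound) pair list of d0 :: rest decomposes head-first
theorem zip_bounds_cons (d0 : Int × List (List Char)) (rest : List (Int × List (List Char))) :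
    (d0 :: rest).zip (((d0 :: rest).drop 1).map (·.1) ++ [(20 : Int)])
      = (d0, (match rest with | [] => (20 : Int) | d1 :: _ => d1.1)) :: rest.zip ((rest.drop 1).map (·.1) ++ [20]) := by
  cases rest <;> simp

theorem aPerms_eq_bPerms (ini : List Char) (diffs : List (Int × List (List Char)))
    (seqs : List (List Char)) :
    aPerms ini seqs diffs = bPerms ini seqs diffs := by
  induction diffs generalizing seqs with
  | nil => simp [aPerms, bPerms]
  | cons d0 rest ih =>
      rw [aPerms.eq_def]
      dsimp only
      rw [aStep_eq_bStep ini seqs d0 rest, ih]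
      simp only [bPerms, zip_bounds_cons, List.foldl_cons]

-- ===== VERDICT (by name: the statement is the Claim_ definition above) =====
theorem all_perms_spec : Claim_equal_all_perms := by
  intro ini seqs diffs _
  unfold Spec_all_perms all_perms all_perms_alt
  rw [aPerms_eq_bPerms]
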